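-- pv_equiv track=rewrite | github.com/BuckeyeVertical/bv_research | TestModel/main.py | apply_winner_take_all
-- ===== SOURCE A (Python) =====
-- def apply_winner_take_all(preds):
--     people = [p for p in preds if p[4] == 0]
--     tents = [p for p in preds if p[4] == 1]
--     final = list(people)
--     if tents:
--         tents.sort(key=lambda x: x[5], reverse=True)
--         final.append(tents[0])
--     return final
-- ===== SOURCE B (Python) =====
-- def apply_winner_take_all(preds):
--     final = []
--     best = None
--     for p in preds:
--         if p[4] == 0:
--             final.append(p)
--         elif p[4] == 1:
--             if best is None or best[5] < p[5]:
--                 best = p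
--     if best is not None:
--         final.append(best)
--     return final
-- ===== Notes on version B (the rewrite author's own statement) =====
-- stated objective: alternative
-- what changed: Replaced the two filter passes plus a stable reverse sort of the tents with one linear scan that appends people as it goes and maintains a single running best tent (strict '<' so the first-occurring maximal tent wins, matching the stable sort).
import Mathlib
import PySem

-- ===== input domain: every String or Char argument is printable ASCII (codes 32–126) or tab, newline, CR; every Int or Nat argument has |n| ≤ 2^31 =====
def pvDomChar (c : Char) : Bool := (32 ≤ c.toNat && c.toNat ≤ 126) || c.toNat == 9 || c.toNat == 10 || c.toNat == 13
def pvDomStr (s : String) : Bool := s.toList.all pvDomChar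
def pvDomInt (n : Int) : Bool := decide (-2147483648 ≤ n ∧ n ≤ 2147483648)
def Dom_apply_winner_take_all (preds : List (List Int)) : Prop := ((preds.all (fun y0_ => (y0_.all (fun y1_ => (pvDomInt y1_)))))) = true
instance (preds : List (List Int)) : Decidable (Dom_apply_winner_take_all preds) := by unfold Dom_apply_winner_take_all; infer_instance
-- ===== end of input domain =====

-- B replaces A's two filter passes + stable reverse sort of the tents by ONE linear scan that
-- appends people in order and keeps a running best tent (strict '<', so the first maximal tent wins).

-- ===== PORT A =====
-- p[4] / x[5] are in range under Pre_ (rows long enough); the pyGetD default is never read there.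
def apply_winner_take_all (preds : List (List Int)) : List (List Int) :=
  let people := preds.filter (fun p => PySem.List.pyGetD p 4 (-1) == 0)
  let tents := preds.filter (fun p => PySem.List.pyGetD p 4 (-1) == 1)
  let final := people
  if tents.isEmpty then final
  else
    let ts := PySem.List.sorted tents (fun x => PySem.List.pyGetD x 5 0) true
    final ++ [ts.headD []]

-- ===== PORT B =====
-- the single pass of Source B: `final` accumulates people, `best` is the running best tent
def awtaLoop : List (List Int) → List (List Int) → Option (List Int) → List (List Int)
  | [], final, best =>
      match best with
      | none => final
      | some b => final ++ [b]
  | p :: rest, final, best =>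
      if PySem.List.pyGetD p 4 (-1) == 0 then awtaLoop rest (final ++ [p]) best
      else if PySem.List.pyGetD p 4 (-1) == 1 then
        match best with
        | none => awtaLoop rest final (some p)
        | some b =>
            if PySem.List.pyGetD b 5 0 < PySem.List.pyGetD p 5 0 then awtaLoop rest final (some p)
            else awtaLoop rest final (some b)
      else awtaLoop rest final best

def apply_winner_take_all_alt (preds : List (List Int)) : List (List Int) :=
  awtaLoop preds [] none

-- ===== PRECONDITION & SPEC =====
-- Pre_ excludes exactly the inputs where Python A raises IndexError: a row shorter than 5
-- (p[4] fails) or a tent row shorter than 6 (the sort key x[5] fails).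
def Pre_apply_winner_take_all (preds : List (List Int)) : Prop :=
  ∀ p ∈ preds, 5 ≤ p.length ∧ (PySem.List.pyGetD p 4 (-1) = 1 → 6 ≤ p.length)
instance (preds : List (List Int)) : Decidable (Pre_apply_winner_take_all preds) := by
  unfold Pre_apply_winner_take_all; infer_instance

def pvWitness_apply_winner_take_all : List (List Int) :=
  [[7, 0, 0, 0, 0], [1, 2, 3, 4, 1, 9], [0, 0, 0, 0, 1, 5, 5]]

def Spec_apply_winner_take_all (preds : List (List Int)) (out : List (List Int)) : Prop := out = apply_winner_take_all_alt preds
instance (preds : List (List Int)) (out : List (List Int)) : Decidable (Spec_apply_winner_take_all preds out) := by unfold Spec_apply_winner_take_all; infer_instance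

-- ===== CLAIM (what is proved, stated in full; the proofs are below) =====
def Claim_equal_apply_winner_take_all : Prop := ∀ (preds : List (List Int)), Dom_apply_winner_take_all preds → Pre_apply_winner_take_all preds → Spec_apply_winner_take_all preds (apply_winner_take_all preds)

-- ===== LEMMAS AND PROOFS =====

-- the running-best step of B, as a fold step over an Option
def awtaBest (o : Option (List Int)) (p : List Int) : Option (List Int) :=
  match o with
  | none => some p
  | some b => if PySem.List.pyGetD b 5 0 < PySem.List.pyGetD p 5 0 then some p else some b

theorem awtaLoop_spec (ps : List (List Int)) :
    ∀ (final : List (List Int)) (best : Option (List Int)),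
    awtaLoop ps final best =
      final ++ ps.filter (fun p => PySem.List.pyGetD p 4 (-1) == 0) ++
        ((ps.filter (fun p => PySem.List.pyGetD p 4 (-1) == 1)).foldl awtaBest best).toList := by
  induction ps with
  | nil =>
      intro final best
      cases best <;> simp [awtaLoop]
  | cons p rest ih =>
      intro final best
      by_cases h0 : PySem.List.pyGetD p 4 (-1) = 0
      · have h1 : ¬ PySem.List.pyGetD p 4 (-1) = 1 := by omega
        simp [awtaLoop, h0, ih]
      · by_cases h1 : PySem.List.pyGetD p 4 (-1) = 1
        · cases best with
          | none => simp [awtaLoop, h1, ih, awtaBest]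
          | some b =>
              by_cases hlt : PySem.List.pyGetD b 5 0 < PySem.List.pyGetD p 5 0 <;>
                simp [awtaLoop, h1, hlt, ih, awtaBest]
        · simp [awtaLoop, h0, h1, ih]

theorem head?_insertBy (before : List Int → List Int → Bool) (x : List Int) (ys : List (List Int)) :
    (PySem.List.insertBy before x ys).head? =
      some (match ys with | [] => x | y :: _ => if before x y then x else y) := by
  cases ys with
  | nil => simp [PySem.List.insertBy]
  | cons y t =>
      by_cases h : before x y = true <;> simp [PySem.List.insertBy, h]

theorem head?_foldl_insertBy (before : List Int → List Int → Bool) (xs : List (List Int)) :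
    ∀ (acc : List (List Int)),
    ((xs.foldl (fun a x => PySem.List.insertBy before x a) acc)).head? =
      xs.foldl
        (fun o x => match o with
          | none => some x
          | some b => if before x b then some x else some b) acc.head? := by
  induction xs with
  | nil => intro acc; simp
  | cons x rest ih =>
      intro acc
      rw [List.foldl_cons, List.foldl_cons, ih, head?_insertBy]
      cases acc <;> simp [apply_ite]

theorem sorted_head?_eq_foldl_awtaBest (xs : List (List Int)) :
    (PySem.List.sorted xs (fun x => PySem.List.pyGetD x 5 0) true).head? =
      xs.foldl awtaBest none := by
  rw [PySem.List.sorted_rev_eq_foldl_insertBy, head?_foldl_insertBy]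
  simp only [List.head?_nil]
  congr 1
  funext o x
  cases o with
  | none => rfl
  | some b => simp [awtaBest]

theorem awta_eq (preds : List (List Int)) :
    apply_winner_take_all preds = apply_winner_take_all_alt preds := by
  unfold apply_winner_take_all apply_winner_take_all_alt
  rw [awtaLoop_spec]
  simp only [List.nil_append]
  set tents := preds.filter (fun p => PySem.List.pyGetD p 4 (-1) == 1) with htents
  by_cases h : tents.isEmpty
  · have : tents = [] := List.isEmpty_iff.mp h
    simp [this]
  · have hne : tents ≠ [] := by simpa [List.isEmpty_iff] using h
    have hs : PySem.List.sorted tents (fun x => PySem.List.pyGetD x 5 0) true ≠ [] := by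
      simpa [PySem.List.sorted_eq_nil_iff] using hne
    obtain ⟨m, t, hm⟩ := List.exists_cons_of_ne_nil hs
    have hfold : tents.foldl awtaBest none = some m := by
      rw [← sorted_head?_eq_foldl_awtaBest, hm]; rfl
    simp [h, hm, hfold]

-- ===== VERDICT (by name: the statement is the Claim_ definition above) =====
theorem apply_winner_take_all_spec : Claim_equal_apply_winner_take_all := by
  intro preds _ _
  unfold Spec_apply_winner_take_all
  exact awta_eq preds
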